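-- pv_equiv track=rewrite | github.com/yonilip/cs_logic | ex1/code/propositions/syntax.py | extract_rhd_symbol
-- ===== SOURCE A (Python) =====
-- def is_variable(s):
--     """ Is s an atomic proposition?  """
--     return 'p' <= s[0] <= 'z' and (len(s) == 1 or s[1:].isdigit())  # simplified for py3
--
-- def is_unary(s):
--     """ Is s a unary operator? """
--     return s == '~'
--
-- def is_binary(s):
--     """ Is s a binary operator? """
--     return s == '&' or s == '|'
--
-- def is_constant(s):
--     """ Is s a constant? """
--     return s == 'T' or s == 'F'
--
-- def extract_rhd_symbol(s):
--     """
--     splits the rhd most symbol from s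
--     :param s: formula as a string
--     :return: tuple of rhd and remaining lhd from split
--     """
--     last_char = s[-1]
--     if is_constant(last_char) or is_unary(last_char) or is_binary(last_char):
--         return s[:-1], last_char
--
--     # var case
--     for i in reversed(range(len(s))):
--         rhd = s[i:]
--         if is_variable(rhd):
--             return s[:i], rhd
-- ===== SOURCE B (Python) =====
-- def extract_rhd_symbol(s):
--     """
--     splits the rhd most symbol from s
--     :param s: formula as a string
--     :return: tuple of rhd and remaining lhd from split
--     """
--     last_char = s[-1]
--     if last_char in ('T', 'F', '~', '&', '|'):
--         return s[:-1], last_char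
--     # var case: a variable suffix is one letter in p..z followed only by digits,
--     # so locate it directly: step left over the trailing digit run, then the
--     # character just before it must be the variable's letter.
--     j = len(s)
--     while j > 0 and '0' <= s[j - 1] <= '9':
--         j -= 1
--     if j > 0 and 'p' <= s[j - 1] <= 'z':
--         return s[:j - 1], s[j - 1:]
-- ===== Notes on version B (the rewrite author's own statement) =====
-- stated objective: faster
-- what changed: Instead of re-testing every growing suffix with is_variable in a reversed loop (each candidate rescanning its tail with isdigit and rebuilding s[i:] slices), B walks left over the trailing digit run once and checks the single boundary character, since a variable suffix can only start right before that run.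
import Mathlib
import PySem

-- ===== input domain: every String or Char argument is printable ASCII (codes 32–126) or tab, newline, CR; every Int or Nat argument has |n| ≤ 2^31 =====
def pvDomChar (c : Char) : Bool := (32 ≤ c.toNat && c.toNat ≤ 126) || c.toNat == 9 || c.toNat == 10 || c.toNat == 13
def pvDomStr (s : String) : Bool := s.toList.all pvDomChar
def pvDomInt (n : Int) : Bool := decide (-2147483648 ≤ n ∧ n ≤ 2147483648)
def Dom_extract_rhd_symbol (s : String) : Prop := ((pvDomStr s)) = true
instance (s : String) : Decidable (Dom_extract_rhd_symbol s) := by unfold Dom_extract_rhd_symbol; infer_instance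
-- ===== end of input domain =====

-- B replaces A's reversed scan over growing suffixes by a single walk over the trailing digit
-- run; return values agree on every nonempty string (both raise IndexError on "").

-- ===== PORT A =====
-- is_constant / is_unary / is_binary: in A they receive the 1-char string s[-1]; ported on Char
def pvIsConstant (c : Char) : Bool := c == 'T' || c == 'F'
def pvIsUnary (c : Char) : Bool := c == '~'
def pvIsBinary (c : Char) : Bool := c == '&' || c == '|'

-- is_variable(s): 'p' <= s[0] <= 'z' and (len(s) == 1 or s[1:].isdigit());
-- in A it is only called on nonempty suffixes s[i:], i < len(s)
def pvIsVariable (cs : List Char) : Bool :=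
  match cs with
  | [] => false  -- unreachable in A (s[0] would raise)
  | c :: rest =>
      (decide ('p' ≤ c) && decide (c ≤ 'z')) &&
        (cs.length == 1 || PySem.Chars.strIsdigit rest)

-- for i in reversed(range(len(s))): first i (descending) with is_variable(s[i:])
def pvLoopA (cs : List Char) : List Nat → Option (String × String)
  | [] => none  -- loop falls through: Python returns None
  | i :: is =>
      if pvIsVariable (cs.drop i) then some (String.ofList (cs.take i), String.ofList (cs.drop i))
      else pvLoopA cs is

def extract_rhd_symbol (s : String) : Option (String × String) :=
  match s.toList.getLast? with  -- last_char = s[-1]; none = IndexError, excluded by Pre_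
  | none => none
  | some last =>
    if pvIsConstant last || pvIsUnary last || pvIsBinary last then
      some (String.ofList s.toList.dropLast, String.ofList [last])  -- s[:-1], last_char
    else
      pvLoopA s.toList ((List.range s.toList.length).reverse)

-- ===== PORT B =====
-- the while loop 'while j > 0 and "0" <= s[j-1] <= "9": j -= 1', run on the reversed
-- character list; the result is s reversed with j characters left (j = its length)
def pvStripDigits : List Char → List Char
  | [] => []
  | c :: rest =>
      if decide ('0' ≤ c) && decide (c ≤ '9') then pvStripDigits rest else c :: rest

def extract_rhd_symbol_alt (s : String) : Option (String × String) :=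
  match s.toList.getLast? with  -- last_char = s[-1]; none = IndexError, excluded by Pre_
  | none => none
  | some last =>
    if last == 'T' || last == 'F' || last == '~' || last == '&' || last == '|' then
      some (String.ofList s.toList.dropLast, String.ofList [last])  -- s[:-1], last_char
    else
      match pvStripDigits s.toList.reverse with
      | [] => none  -- j == 0: fall through, return None
      | c :: rest =>
        -- c = s[j-1], rest.length = j-1
        if decide ('p' ≤ c) && decide (c ≤ 'z') then
          some (String.ofList (s.toList.take rest.length), String.ofList (s.toList.drop rest.length))
        else none

-- ===== PRECONDITION & SPEC =====
-- Pre_ excludes only the empty string, on which A raises IndexError (s[-1])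
def Pre_extract_rhd_symbol (s : String) : Prop := s ≠ ""
instance (s : String) : Decidable (Pre_extract_rhd_symbol s) := by
  unfold Pre_extract_rhd_symbol; infer_instance
def pvWitness_extract_rhd_symbol : String := "p12"

def Spec_extract_rhd_symbol (s : String) (out : Option (String × String)) : Prop := out = extract_rhd_symbol_alt s
instance (s : String) (out : Option (String × String)) : Decidable (Spec_extract_rhd_symbol s out) := by unfold Spec_extract_rhd_symbol; infer_instance

-- ===== CLAIM (what is proved, stated in full; the proofs are below) =====
def Claim_equal_extract_rhd_symbol : Prop := ∀ (s : String), Dom_extract_rhd_symbol s → Pre_extract_rhd_symbol s → Spec_extract_rhd_symbol s (extract_rhd_symbol s)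

-- ===== LEMMAS AND PROOFS =====

-- a digit character is below 'p', so a digit can never open a variable
theorem pv_dig_not_p {c : Char} (h : (decide ('0' ≤ c) && decide (c ≤ '9')) = true) :
    decide ('p' ≤ c) = false := by
  simp only [Bool.and_eq_true, decide_eq_true_eq] at h
  simp only [decide_eq_false_iff_not]
  intro hp
  exact absurd (le_trans hp h.2) (by decide)

-- the while loop of B is dropWhile-digits on the reversed list
theorem pvStripDigits_eq_dropWhile (r : List Char) :
    pvStripDigits r = r.dropWhile (fun c => decide ('0' ≤ c) && decide (c ≤ '9')) := by
  induction r with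
  | nil => rfl
  | cons c t ih =>
    by_cases h : (decide ('0' ≤ c) && decide (c ≤ '9')) = true
    · simp [pvStripDigits, List.dropWhile, h, ih]
    · rw [Bool.not_eq_true] at h
      simp [pvStripDigits, List.dropWhile, h]

-- a suffix reaching past a non-digit character cannot be a variable
theorem pvIsVariable_false_of_nondigit (cs : List Char) (i k : Nat) (hik : i < k)
    (hk : k < cs.length)
    (hnd : (decide ('0' ≤ cs[k]) && decide (cs[k] ≤ '9')) = false) :
    pvIsVariable (cs.drop i) = false := by
  rw [← List.getElem_cons_drop (by omega : i < cs.length)]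
  simp only [pvIsVariable, Bool.and_eq_false_iff]
  right
  have hlen : (cs[i] :: cs.drop (i + 1)).length ≠ 1 := by
    simp only [List.length_cons, List.length_drop]; omega
  simp only [Bool.or_eq_false_iff]
  refine ⟨by simpa using hlen, ?_⟩
  have hmem : cs[k] ∈ cs.drop (i + 1) := by
    have : cs[k] = (cs.drop (i + 1))[k - (i + 1)]'(by simp; omega) := by
      rw [List.getElem_drop]; congr 1; omega
    rw [this]; exact List.getElem_mem _
  simp only [PySem.Chars.strIsdigit]
  simp only [Bool.and_eq_false_iff, List.all_eq_false]
  right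
  refine ⟨cs[k], hmem, ?_⟩
  have : PySem.Chars.isdigit cs[k] = (decide ('0' ≤ cs[k]) && decide (cs[k] ≤ '9')) := by
    simp [PySem.Chars.isdigit]
  simp [this, hnd]

-- once a non-digit sits at position k, every remaining candidate i < k fails and A's loop returns None
theorem pvLoopA_none (cs : List Char) (k : Nat) (hk : k < cs.length)
    (hnd : (decide ('0' ≤ cs[k]) && decide (cs[k] ≤ '9')) = false) :
    ∀ is : List Nat, (∀ i ∈ is, i < k) → pvLoopA cs is = none := by
  intro is
  induction is with
  | nil => intro _; rfl
  | cons i t ih =>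
    intro h
    simp only [pvLoopA]
    rw [pvIsVariable_false_of_nondigit cs i k (h i (by simp)) hk hnd]
    exact ih (fun j hj => h j (by simp [hj]))

theorem pvMainAux (cs : List Char) :
    ∀ k, k ≤ cs.length →
      (cs.drop k).all (fun c => decide ('0' ≤ c) && decide (c ≤ '9')) = true →
      pvLoopA cs ((List.range k).reverse) =
        (match pvStripDigits cs.reverse with
         | [] => none
         | c :: rest =>
           if decide ('p' ≤ c) && decide (c ≤ 'z') then
             some (String.ofList (cs.take rest.length), String.ofList (cs.drop rest.length))
           else none) := by
  intro k
  induction k with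
  | zero =>
    intro _ hall
    have : pvStripDigits cs.reverse = [] := by
      rw [pvStripDigits_eq_dropWhile]
      refine List.dropWhile_eq_nil_iff.mpr ?_
      rw [List.drop_zero] at hall
      intro x hx
      exact List.all_eq_true.mp hall x (List.mem_reverse.mp hx)
    simp [this, pvLoopA]
  | succ k ih =>
    intro hk1 hall
    have hk : k < cs.length := by omega
    have hrange : (List.range (k + 1)).reverse = k :: (List.range k).reverse := by
      simp [List.range_succ]

    rw [hrange]
    simp only [pvLoopA]
    have hdropk : cs[k] :: cs.drop (k + 1) = cs.drop k := List.getElem_cons_drop hk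
    by_cases hdig : (decide ('0' ≤ cs[k]) && decide (cs[k] ≤ '9')) = true
    · -- cs[k] is a digit: this candidate fails, recurse
      have hvar : pvIsVariable (cs.drop k) = false := by
        rw [← hdropk]
        simp only [pvIsVariable]
        simp [pv_dig_not_p hdig]
      rw [hvar]
      refine ih hk.le ?_
      rw [← hdropk]
      simp only [List.all_cons, hdig, Bool.true_and]
      exact hall
    · -- cs[k] is the boundary character
      rw [Bool.not_eq_true] at hdig
      have hvar : pvIsVariable (cs.drop k) = (decide ('p' ≤ cs[k]) && decide (cs[k] ≤ 'z')) := by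
        rw [← hdropk]
        simp only [pvIsVariable]
        have htail : ((cs[k] :: cs.drop (k + 1)).length == 1 ||
            PySem.Chars.strIsdigit (cs.drop (k + 1))) = true := by
          cases hd : cs.drop (k + 1) with
          | nil => simp
          | cons d t =>
            have hall2 : (cs.drop (k + 1)).all PySem.Chars.isdigit = true := by
              refine List.all_eq_true.mpr ?_
              intro x hx
              have := List.all_eq_true.mp hall x hx
              simpa [PySem.Chars.isdigit] using this
            simp only [Bool.or_eq_true]
            right
            rw [hd] at hall2
            simp [PySem.Chars.strIsdigit, hall2]
        rw [htail, Bool.and_true]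
      have hstrip : pvStripDigits cs.reverse = cs[k] :: (cs.take k).reverse := by
        rw [pvStripDigits_eq_dropWhile]
        have hsplit : cs.reverse = (cs.drop (k + 1)).reverse ++ ([cs[k]] ++ (cs.take k).reverse) := by
          have h1 : cs = cs.take k ++ cs[k] :: cs.drop (k + 1) := by
            rw [hdropk, List.take_append_drop]
          conv_lhs => rw [h1]
          simp
        rw [hsplit, List.dropWhile_append]
        have h1 : (cs.drop (k + 1)).reverse.dropWhile
            (fun c => decide ('0' ≤ c) && decide (c ≤ '9')) = [] := by
          refine List.dropWhile_eq_nil_iff.mpr ?_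
          intro x hx
          exact (List.all_eq_true.mp hall) x (List.mem_reverse.mp hx)
        rw [h1]
        simp [hdig]
      rw [hstrip]
      have hlen : (cs.take k).reverse.length = k := by
        simp [List.length_take, Nat.min_eq_left hk.le]
      by_cases hX : (decide ('p' ≤ cs[k]) && decide (cs[k] ≤ 'z')) = true
      · rw [hvar, hX]
        simp [hX, hlen]
      · rw [Bool.not_eq_true] at hX
        rw [hvar, hX]
        simp only [hX, Bool.false_eq_true, if_false]
        exact pvLoopA_none cs k hk hdig _ (by intro i hi; simpa using List.mem_range.mp (by simpa using hi))

theorem pvMain (cs : List Char) :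
    pvLoopA cs ((List.range cs.length).reverse) =
      (match pvStripDigits cs.reverse with
       | [] => none
       | c :: rest =>
         if decide ('p' ≤ c) && decide (c ≤ 'z') then
           some (String.ofList (cs.take rest.length), String.ofList (cs.drop rest.length))
         else none) :=
  pvMainAux cs cs.length le_rfl (by simp)

-- ===== VERDICT (by name: the statement is the Claim_ definition above) =====
theorem extract_rhd_symbol_spec : Claim_equal_extract_rhd_symbol := by
  intro s _ _
  unfold Spec_extract_rhd_symbol extract_rhd_symbol extract_rhd_symbol_alt
  cases h : s.toList.getLast? with
  | none => rfl
  | some last =>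
    simp only [pvIsConstant, pvIsUnary, pvIsBinary, Bool.or_assoc]
    split
    · rfl
    · exact pvMain s.toList
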